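-- pv_equiv track=rewrite | github.com/micfun123/DSALG | hashing.py | run_trial
-- ===== SOURCE A (Python) =====
-- def modulo_hash(key, m):
--     return key % m
--
-- def run_trial(keys, m):
--     """Compute collisions for one trial with given keys and modulus m.
--
--     Returns the number of collisions (i.e., keys that map to already used
--     buckets). Equivalent to num_keys - number_of_occupied_buckets.
--     """
--     seen = set()
--     collisions = 0
--     for k in keys:
--         h = modulo_hash(k, m)
--         if h in seen:
--             collisions += 1
--         else:
--             seen.add(h)
--     return collisions
-- ===== SOURCE B (Python) =====
-- def run_trial(keys, m):
--     residues = sorted(k % m for k in keys)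
--     return sum(1 for a, b in zip(residues, residues[1:]) if a == b)
-- ===== Notes on version B (the rewrite author's own statement) =====
-- stated objective: alternative
-- what changed: Replaces A's incremental set-membership loop by a sort-then-scan algorithm: sort the residues, then count adjacent equal pairs (each duplicate residue after sorting sits next to an earlier copy, so adjacent-equal pairs = keys - distinct buckets = collisions).
import Mathlib
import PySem

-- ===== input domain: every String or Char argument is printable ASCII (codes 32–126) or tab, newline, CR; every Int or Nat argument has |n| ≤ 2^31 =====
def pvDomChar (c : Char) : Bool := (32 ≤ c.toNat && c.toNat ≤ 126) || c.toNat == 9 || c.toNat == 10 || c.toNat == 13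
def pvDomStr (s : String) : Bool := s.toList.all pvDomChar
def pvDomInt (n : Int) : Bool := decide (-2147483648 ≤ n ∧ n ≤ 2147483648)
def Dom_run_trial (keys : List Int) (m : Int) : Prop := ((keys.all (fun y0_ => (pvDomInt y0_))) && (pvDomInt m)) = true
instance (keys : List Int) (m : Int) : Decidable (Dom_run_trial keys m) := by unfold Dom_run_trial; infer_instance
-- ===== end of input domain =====

-- B sorts the residues and counts adjacent equal pairs (sort-then-scan) instead of A's incremental set-membership loop; same result, different algorithm.


-- ===== PORT A =====
def modulo_hash (key : Int) (m : Int) : Int := PySem.Int.mod key m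

def run_trial (keys : List Int) (m : Int) : Int :=
  (keys.foldl
    (fun (st : PySem.Set Int × Int) k =>
      let h := modulo_hash k m
      if PySem.Set.contains st.1 h then (st.1, st.2 + 1)
      else (PySem.Set.add st.1 h, st.2))
    (PySem.Set.empty, 0)).2

-- ===== PORT B =====
def run_trial_alt (keys : List Int) (m : Int) : Int :=
  let residues := PySem.List.sorted (keys.map (fun k => PySem.Int.mod k m)) (fun x => x) false
  (residues.zip residues.tail).foldl (fun (acc : Int) p => if p.1 == p.2 then acc + 1 else acc) 0

-- ===== PRECONDITION & SPEC =====
-- Pre_ excludes exactly the inputs on which the Python A raises ZeroDivisionError: m = 0 with a nonempty key list.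
def Pre_run_trial (keys : List Int) (m : Int) : Prop := m ≠ 0 ∨ keys = []
instance (keys : List Int) (m : Int) : Decidable (Pre_run_trial keys m) := by unfold Pre_run_trial; infer_instance
def pvWitness_run_trial : List Int × Int := ([3, 5, 8, 3], 5)

def Spec_run_trial (keys : List Int) (m : Int) (out : Int) : Prop := out = run_trial_alt keys m
instance (keys : List Int) (m : Int) (out : Int) : Decidable (Spec_run_trial keys m out) := by unfold Spec_run_trial; infer_instance

-- ===== CLAIM (what is proved, stated in full; the proofs are below) =====
def Claim_equal_run_trial : Prop := ∀ (keys : List Int) (m : Int), Dom_run_trial keys m → Pre_run_trial keys m → Spec_run_trial keys m (run_trial keys m)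

-- ===== LEMMAS AND PROOFS =====

theorem set_add_length (s : PySem.Set Int) (x : Int) :
    ((PySem.Set.add s x).length : Int)
      = if PySem.Set.contains s x then (s.length : Int) else (s.length : Int) + 1 := by
  simp [PySem.Set.add]
  split <;> simp

-- A-side loop invariant: collisions so far + occupied buckets = initial count + keys processed + initial buckets
theorem run_trial_inv (m : Int) (l : List Int) (seen : PySem.Set Int) (c : Int) :
    ((l.foldl
        (fun (st : PySem.Set Int × Int) k =>
          let h := modulo_hash k m
          if PySem.Set.contains st.1 h then (st.1, st.2 + 1)
          else (PySem.Set.add st.1 h, st.2))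
        (seen, c)).2)
      + ((PySem.Set.update seen (l.map (fun k => PySem.Int.mod k m))).length : Int)
      = c + (l.length : Int) + (seen.length : Int) := by
  induction l generalizing seen c with
  | nil => simp [PySem.Set.update]
  | cons k l ih =>
    rw [List.foldl_cons, List.map_cons]
    simp only [PySem.Set.update, List.foldl_cons, modulo_hash]
    by_cases h : PySem.Set.contains seen (PySem.Int.mod k m)
    · rw [if_pos h]
      have heq : PySem.Set.add seen (PySem.Int.mod k m) = seen := by
        unfold PySem.Set.add; rw [if_pos h]
      rw [heq]
      have hih := ih seen (c + 1)
      simp only [PySem.Set.update, modulo_hash] at hih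
      simp only [List.length_cons] at ⊢
      push_cast at hih ⊢
      linarith
    · rw [if_neg h]
      have hih := ih (PySem.Set.add seen (PySem.Int.mod k m)) c
      simp only [PySem.Set.update, modulo_hash] at hih
      have hl := set_add_length seen (PySem.Int.mod k m)
      rw [if_neg h] at hl
      simp only [List.length_cons] at ⊢
      push_cast at hih hl ⊢
      linarith

-- the B-side fold is countP of adjacent-equal pairs
theorem foldl_count_eq (l : List (Int × Int)) (c : Int) :
    l.foldl (fun (acc : Int) p => if p.1 == p.2 then acc + 1 else acc) c
      = c + (l.countP (fun p => p.1 == p.2) : Int) := by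
  induction l generalizing c with
  | nil => simp
  | cons p l ih =>
    rw [List.foldl_cons, ih, List.countP_cons]
    by_cases h : p.1 = p.2 <;> simp [h] <;> ring

-- ofList's length is the number of distinct elements
theorem ofList_length (l : List Int) :
    (PySem.Set.ofList l).length = l.toFinset.card := by
  have hnd : (PySem.Set.ofList l).Nodup := PySem.Set.nodup_ofList l
  have hmem : ∀ x, x ∈ PySem.Set.ofList l ↔ x ∈ l := fun x => PySem.Set.mem_ofList l x
  have : (PySem.Set.ofList l).toFinset = l.toFinset := by
    ext x; simp [hmem x]
  calc (PySem.Set.ofList l).length = (PySem.Set.ofList l).toFinset.card :=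
        (List.toFinset_card_of_nodup hnd).symm
    _ = l.toFinset.card := by rw [this]

-- in a sorted (Pairwise ≤) list, adjacent-equal pairs + distinct elements = length
theorem adj_count_sorted (s : List Int) (hs : s.Pairwise (· ≤ ·)) :
    (s.zip s.tail).countP (fun p => p.1 == p.2) + s.toFinset.card = s.length := by
  induction s with
  | nil => simp
  | cons a t ih =>
    cases t with
    | nil => simp
    | cons b t' =>
      have hab : a ≤ b := (List.pairwise_cons.mp hs).1 b (by simp)
      have hs' : (b :: t').Pairwise (· ≤ ·) := (List.pairwise_cons.mp hs).2
      have ih' := ih hs'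
      have hzip : ((a :: b :: t').zip (a :: b :: t').tail)
          = (a, b) :: ((b :: t').zip (b :: t').tail) := by simp
      rw [hzip, List.countP_cons]
      by_cases h : a = b
      · have hins : (a :: b :: t').toFinset = (b :: t').toFinset := by
          rw [List.toFinset_cons]
          exact Finset.insert_eq_self.mpr (by simp [h])
        rw [hins]
        simp only [beq_iff_eq, h, if_true]
        simp only [List.length_cons] at ih' ⊢
        omega
      · have hnot : a ∉ (b :: t') := by
          intro hm
          rcases List.mem_cons.mp hm with h1 | h2
          · exact h h1
          · have hb : b ≤ a := (List.pairwise_cons.mp hs').1 a h2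
            exact h (le_antisymm hab hb)
        have hins : (a :: b :: t').toFinset.card = (b :: t').toFinset.card + 1 := by
          rw [List.toFinset_cons, Finset.card_insert_of_notMem (by simpa using hnot)]
        simp only [beq_iff_eq, h, if_false]
        simp only [List.length_cons] at ih' ⊢
        omega

-- ===== VERDICT (by name: the statement is the Claim_ definition above) =====
theorem run_trial_spec : Claim_equal_run_trial := by
  intro keys m _ _
  unfold Spec_run_trial run_trial run_trial_alt
  have hperm : (PySem.List.sorted (keys.map (fun k => PySem.Int.mod k m)) (fun x => x) false).Perm
      (keys.map (fun k => PySem.Int.mod k m)) :=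
    PySem.List.sorted_perm _ _ _
  have hpw : (PySem.List.sorted (keys.map (fun k => PySem.Int.mod k m)) (fun x => x) false).Pairwise (· ≤ ·) := by
    simpa using PySem.List.sorted_pairwise (xs := keys.map (fun k => PySem.Int.mod k m))
      (key := fun x : Int => x)
  -- A's value via the invariant
  have hA := run_trial_inv m keys PySem.Set.empty 0
  have hupd : PySem.Set.update PySem.Set.empty (keys.map (fun k => PySem.Int.mod k m))
      = PySem.Set.ofList (keys.map (fun k => PySem.Int.mod k m)) := by
    rw [PySem.Set.ofList_eq_foldl]; rfl
  rw [hupd, show ((PySem.Set.empty : PySem.Set Int).length : Int) = 0 from rfl] at hA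
  -- B's value via the sorted-scan lemma
  rw [foldl_count_eq]
  have hB := adj_count_sorted _ hpw
  have hfs : (PySem.List.sorted (keys.map (fun k => PySem.Int.mod k m)) (fun x => x) false).toFinset
      = (keys.map (fun k => PySem.Int.mod k m)).toFinset := by
    ext x; simp [hperm.mem_iff]
  have hlen := hperm.length_eq
  have hof := ofList_length (keys.map (fun k => PySem.Int.mod k m))
  rw [hfs, hlen, ← hof, List.length_map] at hB
  -- combine: A + |ofList residues| = |keys|  and  B + |ofList residues| = |keys|
  omega
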